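-- pv_equiv track=rewrite | github.com/giovannitarter/adventofcode | 2021/08/sol.py | build_solutions
-- ===== SOURCE A (Python) =====
-- import itertools
--
-- def all_mappings(A, B):
--
--     res = []
--
--     for pb in itertools.permutations(B):
--
--         new_map = {}
--         for idx, a in enumerate(A):
--             new_map[a] = pb[idx]
--         res.append(new_map)
--
--     return res
--
-- def dict_merge_mappings(A, B):
--     """
--     A -> list of dicts
--     B -> list of dicts
--     """
--
--     res = []
--     for a in A:
--         for b in B:
--             r = dict(a)
--             r.update(b)
--             res.append(r)
--
--     return res
--
-- def build_solutions(pat_to_dig, not_assigned):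
--
--     base = {}
--     for p in pat_to_dig:
--         if len(pat_to_dig[p]) == 1:
--             base[pat_to_dig[p][0]] = p
--
--     res = [base]
--     for dig_na, p_na in not_assigned.items():
--         tmp = all_mappings(dig_na, p_na)
--         res = dict_merge_mappings(res, tmp)
--
--     return res
-- ===== SOURCE B (Python) =====
-- import itertools
--
--
-- def all_mappings(A, B):
--     return [dict(zip(A, pb)) for pb in itertools.permutations(B)]
--
--
-- def build_solutions(pat_to_dig, not_assigned):
--     base = {v[0]: k for k, v in pat_to_dig.items() if len(v) == 1}
--     groups = [all_mappings(k, v) for k, v in not_assigned.items()]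
--     res = []
--     for combo in itertools.product(*groups):
--         r = dict(base)
--         for m in combo:
--             r.update(m)
--         res.append(r)
--     return res
-- ===== Notes on version B (the rewrite author's own statement) =====
-- stated objective: alternative
-- what changed: B replaces A's repeated list-against-list Cartesian merges (dict_merge_mappings folded once per not_assigned entry) by building all per-entry permutation groups first and doing a single pass over itertools.product(*groups), updating one copy of base per combination; all_mappings becomes dict(zip(...)) per permutation.
-- outside the precondition, e.g. on build_solutions({}, {'ab': ['x']}): A raises IndexError, B returns [{'a': 'x'}]
import Mathlib
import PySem

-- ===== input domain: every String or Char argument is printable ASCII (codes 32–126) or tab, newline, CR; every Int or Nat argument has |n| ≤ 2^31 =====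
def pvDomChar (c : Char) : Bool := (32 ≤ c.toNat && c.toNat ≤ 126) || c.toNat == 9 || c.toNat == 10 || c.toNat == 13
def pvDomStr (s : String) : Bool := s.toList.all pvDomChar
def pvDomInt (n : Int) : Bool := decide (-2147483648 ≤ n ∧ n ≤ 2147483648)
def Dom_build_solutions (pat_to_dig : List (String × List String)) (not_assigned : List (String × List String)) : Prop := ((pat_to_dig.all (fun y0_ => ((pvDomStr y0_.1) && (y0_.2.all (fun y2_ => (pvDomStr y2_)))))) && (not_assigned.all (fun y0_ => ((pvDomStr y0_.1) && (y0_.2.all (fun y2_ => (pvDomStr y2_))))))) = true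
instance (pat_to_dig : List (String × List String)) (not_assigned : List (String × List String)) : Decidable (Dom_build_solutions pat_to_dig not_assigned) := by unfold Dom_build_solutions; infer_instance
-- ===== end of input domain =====

-- B replaces A's chain of pairwise list-against-list dict merges by one pass over the
-- combined Cartesian product of the per-digit permutation groups (same values, alternative decomposition).

-- ===== PORT A =====
-- all_mappings(A, B): for pb in permutations(B): dict mapping each char of A to pb[idx].
-- pb[idx] is ported as pyGetD, exact under Pre_ (len(A) ≤ len(B); otherwise Python raises IndexError).
def all_mappings_a (A : String) (B : List String) : List (PySem.Dict String String) :=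
  (PySem.List.permutations B B.length).foldl
    (fun res pb =>
      res ++ [(PySem.List.enumerate A.toList 0).foldl
        (fun new_map p => new_map.insert (String.singleton p.2) (PySem.List.pyGetD pb p.1 ""))
        PySem.Dict.empty])
    []

def dict_merge_mappings_a (A B : List (PySem.Dict String String)) : List (PySem.Dict String String) :=
  A.foldl (fun res a => B.foldl (fun res b => res ++ [PySem.Dict.update a b.items]) res) []

-- dict parameters arrive as assoc lists; under Pre_ (distinct keys, as in any real Python dict)
-- Python's 'for p in pat_to_dig: … pat_to_dig[p]' visits exactly the item pairs, ported as such.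
def build_solutions (pat_to_dig : List (String × List String)) (not_assigned : List (String × List String)) : List (List (String × String)) :=
  let base := pat_to_dig.foldl
    (fun base p => if p.2.length == 1 then base.insert (PySem.List.pyGetD p.2 0 "") p.1 else base)
    PySem.Dict.empty
  let res := not_assigned.foldl
    (fun res kv => dict_merge_mappings_a res (all_mappings_a kv.1 kv.2)) [base]
  res.map PySem.Dict.items

-- ===== PORT B =====
-- all_mappings in Source B: [dict(zip(A, pb)) for pb in permutations(B)]
def all_mappings_b (A : String) (B : List String) : List (PySem.Dict String String) :=
  (PySem.List.permutations B B.length).map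
    (fun pb => PySem.Dict.ofList ((A.toList.map String.singleton).zip pb))

-- itertools.product(*groups), leftmost factor slowest
def pyProduct {α : Type} : List (List α) → List (List α)
  | [] => [[]]
  | g :: gs => g.flatMap (fun x => (pyProduct gs).map (fun c => x :: c))

def build_solutions_alt (pat_to_dig : List (String × List String)) (not_assigned : List (String × List String)) : List (List (String × String)) :=
  let base := PySem.Dict.ofList
    ((pat_to_dig.filter (fun kv => kv.2.length == 1)).map (fun kv => (PySem.List.pyGetD kv.2 0 "", kv.1)))
  let groups := not_assigned.map (fun kv => all_mappings_b kv.1 kv.2)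
  (pyProduct groups).map
    (fun combo => (combo.foldl (fun r m => PySem.Dict.update r m.items) base).items)

-- ===== PRECONDITION & SPEC =====
-- Pre_ excludes (a) assoc lists with duplicate keys: both parameters are Python dicts, which cannot
-- carry duplicate keys, so behaviour there is an artefact of the assoc-list encoding; and
-- (b) a not_assigned entry whose key string is longer than its value list, on which A raises IndexError.
def Pre_build_solutions (pat_to_dig : List (String × List String)) (not_assigned : List (String × List String)) : Prop :=
  (pat_to_dig.map Prod.fst).Nodup ∧ (not_assigned.map Prod.fst).Nodup ∧
    ∀ kv ∈ not_assigned, kv.1.toList.length ≤ kv.2.length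
instance (pat_to_dig : List (String × List String)) (not_assigned : List (String × List String)) : Decidable (Pre_build_solutions pat_to_dig not_assigned) := by unfold Pre_build_solutions; infer_instance

def pvWitness_build_solutions : (List (String × List String)) × (List (String × List String)) :=
  ([("ab", ["c"]), ("d", ["e", "f"])], [("g", ["x", "y"])])

def Spec_build_solutions (pat_to_dig : List (String × List String)) (not_assigned : List (String × List String)) (out : List (List (String × String))) : Prop := out = build_solutions_alt pat_to_dig not_assigned
instance (pat_to_dig : List (String × List String)) (not_assigned : List (String × List String)) (out : List (List (String × String))) : Decidable (Spec_build_solutions pat_to_dig not_assigned out) := by unfold Spec_build_solutions; infer_instance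

-- ===== CLAIM (what is proved, stated in full; the proofs are below) =====
def Claim_equal_build_solutions : Prop := ∀ (pat_to_dig : List (String × List String)) (not_assigned : List (String × List String)), Dom_build_solutions pat_to_dig not_assigned → Pre_build_solutions pat_to_dig not_assigned → Spec_build_solutions pat_to_dig not_assigned (build_solutions pat_to_dig not_assigned)

-- ===== LEMMAS AND PROOFS =====

-- A's base loop equals B's dict comprehension (update over the filtered-mapped pairs).
theorem base_foldl_eq (l : List (String × List String)) (d : PySem.Dict String String) :
    l.foldl (fun b p => if p.2.length == 1 then b.insert (PySem.List.pyGetD p.2 0 "") p.1 else b) d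
      = PySem.Dict.update d ((l.filter (fun kv => kv.2.length == 1)).map (fun kv => (PySem.List.pyGetD kv.2 0 "", kv.1))) := by
  induction l generalizing d with
  | nil => rfl
  | cons x xs ih =>
      by_cases h : (x.2.length == 1) = true
      · simp only [List.foldl_cons, List.filter_cons, h, List.map_cons, if_pos]
        rw [ih]
        rfl
      · simp only [List.foldl_cons, List.filter_cons, h, Bool.false_eq_true, if_false]
        exact ih d

-- the enumerate-and-index fold of A equals the zip fold of B, for any tail offset k
theorem enum_fold_eq_zip_fold (cs : List Char) (pb : List String) (k : Nat)
    (m : PySem.Dict String String) (h : k + cs.length ≤ pb.length) :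
    (PySem.List.enumerate cs (k : Int)).foldl
        (fun m p => m.insert (String.singleton p.2) (PySem.List.pyGetD pb p.1 "")) m
      = ((cs.map String.singleton).zip (pb.drop k)).foldl (fun m p => m.insert p.1 p.2) m := by
  induction cs generalizing k m with
  | nil => simp [PySem.List.enumerate_nil]
  | cons c cs ih =>
      have hk : k < pb.length := by simp at h; omega
      rw [PySem.List.enumerate_cons]
      have hdrop : pb.drop k = pb[k] :: pb.drop (k + 1) := (List.getElem_cons_drop hk).symm
      rw [hdrop]
      simp only [List.map_cons, List.zip_cons_cons, List.foldl_cons]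
      have : ((k : Int) + 1) = ((k + 1 : Nat) : Int) := by push_cast; ring
      rw [this, ih (k + 1) _ (by simp at h ⊢; omega)]
      congr 1
      simp [PySem.List.pyGetD_natCast, List.getD_eq_getElem?_getD, hk]

theorem all_mappings_eq (A : String) (B : List String) (h : A.toList.length ≤ B.length) :
    all_mappings_a A B = all_mappings_b A B := by
  unfold all_mappings_a all_mappings_b
  rw [PySem.List.foldl_append_singleton_eq_map]
  simp only [List.nil_append]
  apply List.map_congr_left
  intro pb hpb
  have hlen : pb.length = B.length := (PySem.List.perm_of_mem_permutations hpb).length_eq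
  have := enum_fold_eq_zip_fold A.toList pb 0 PySem.Dict.empty (by omega)
  simpa [PySem.Dict.ofList, PySem.Dict.update] using this

-- dict_merge_mappings as a flatMap
theorem merge_eq_flatMap (R G : List (PySem.Dict String String)) :
    dict_merge_mappings_a R G
      = R.flatMap (fun a => G.map (fun b => PySem.Dict.update a b.items)) := by
  unfold dict_merge_mappings_a
  rw [PySem.List.foldl_congr_mem _ _ (fun res a => res ++ G.map (fun b => PySem.Dict.update a b.items))]
  · rw [PySem.List.foldl_append_eq_flatMap]; simp
  · intro acc a _; rw [PySem.List.foldl_append_singleton_eq_map]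

-- the chain of merges over groups is one pass over the Cartesian product
theorem foldl_merge_eq_product (groups : List (List (PySem.Dict String String)))
    (R : List (PySem.Dict String String)) :
    groups.foldl dict_merge_mappings_a R
      = R.flatMap (fun r => (pyProduct groups).map
          (fun combo => combo.foldl (fun r m => PySem.Dict.update r m.items) r)) := by
  induction groups generalizing R with
  | nil => simp [pyProduct]
  | cons g gs ih =>
      simp only [List.foldl_cons, ih, merge_eq_flatMap, pyProduct]
      simp [List.flatMap_assoc, List.map_flatMap, List.flatMap_map, Function.comp_def]

-- ===== VERDICT (by name: the statement is the Claim_ definition above) =====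
theorem build_solutions_spec : Claim_equal_build_solutions := by
  intro ptd na _hdom hpre
  unfold Spec_build_solutions
  simp only [build_solutions, build_solutions_alt]
  obtain ⟨-, -, hlen⟩ := hpre
  rw [base_foldl_eq]
  have hgroups :
      na.foldl (fun res kv => dict_merge_mappings_a res (all_mappings_a kv.1 kv.2))
          [PySem.Dict.update PySem.Dict.empty
            ((ptd.filter (fun kv => kv.2.length == 1)).map (fun kv => (PySem.List.pyGetD kv.2 0 "", kv.1)))]
        = (na.map (fun kv => all_mappings_b kv.1 kv.2)).foldl dict_merge_mappings_a
          [PySem.Dict.update PySem.Dict.empty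
            ((ptd.filter (fun kv => kv.2.length == 1)).map (fun kv => (PySem.List.pyGetD kv.2 0 "", kv.1)))] := by
    rw [List.foldl_map]
    apply PySem.List.foldl_congr_mem
    intro acc kv hkv
    rw [all_mappings_eq kv.1 kv.2 (hlen kv hkv)]
  rw [hgroups, foldl_merge_eq_product]
  simp [PySem.Dict.ofList, List.map_map, Function.comp]
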